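-- pv_equiv track=rewrite | github.com/ucyuunaka/The-Farmer-Was-Replaced | 南瓜最新测试.py | optimize_coords
-- ===== SOURCE A (Python) =====
-- def optimize_coords(coords):
-- 	if not coords:
-- 		return []
--
-- 	# 按x坐标分组
-- 	by_column = {}
-- 	for x, y in coords:
-- 		if x not in by_column:
-- 			by_column[x] = []
-- 		by_column[x].append(y)
--
-- 	# 蛇形排序
-- 	result = []
-- 	columns = sorted(by_column.keys())
-- 	for i, col in enumerate(columns):
-- 		ys = sorted(by_column[col], reverse=(i % 2 == 1))
-- 		result.extend([(col, y) for y in ys])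
--
-- 	return result
-- ===== SOURCE B (Python) =====
-- def optimize_coords(coords):
--     # One global sort (stable, by y then by x) followed by a single boustrophedon scan:
--     # no dict grouping, no per-column sort.
--     s = sorted(coords, key=lambda p: p[1])
--     s = sorted(s, key=lambda p: p[0])
--     result = []
--     rev = False
--     run = []
--     prev_x = None
--     for x, y in s:
--         if run and prev_x != x:
--             result.extend(reversed(run) if rev else run)
--             rev = not rev
--             run = []
--         run.append((x, y))
--         prev_x = x
--     result.extend(reversed(run) if rev else run)
--     return result
-- ===== Notes on version B (the rewrite author's own statement) =====
-- stated objective: alternative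
-- what changed: A groups points into a dict keyed by column and sorts each column's ys separately (reversed on odd columns); B sorts the whole list once by two stable passes (by y, then by x) and emits the boustrophedon order in a single scan with a run buffer that is reversed on odd columns.
import Mathlib
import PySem

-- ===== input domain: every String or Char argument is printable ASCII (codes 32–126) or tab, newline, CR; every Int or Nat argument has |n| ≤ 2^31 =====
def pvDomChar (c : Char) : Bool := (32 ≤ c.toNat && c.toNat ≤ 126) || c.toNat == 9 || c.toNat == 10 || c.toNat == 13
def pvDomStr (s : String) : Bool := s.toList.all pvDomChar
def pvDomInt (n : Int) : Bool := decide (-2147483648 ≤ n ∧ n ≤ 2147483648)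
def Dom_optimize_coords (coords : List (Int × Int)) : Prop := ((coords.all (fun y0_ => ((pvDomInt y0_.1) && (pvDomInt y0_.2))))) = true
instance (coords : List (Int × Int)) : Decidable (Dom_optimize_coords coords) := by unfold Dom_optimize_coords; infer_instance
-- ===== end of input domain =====

-- B replaces A's dict-grouping + per-column sorts by one global stable sort (by y, then by x)
-- followed by a single boustrophedon scan with a run buffer; objective: alternative (same cost).

-- ===== PORT A =====
def optimize_coords (coords : List (Int × Int)) : List (Int × Int) :=
  if coords = [] then []
  else
    -- by_column: for x, y in coords: if x not in by_column: by_column[x] = []; by_column[x].append(y)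
    let by_column : PySem.Dict Int (List Int) :=
      coords.foldl (fun d p =>
        (if d.contains p.1 then d else d.insert p.1 []).modify p.1 [] (fun l => l ++ [p.2]))
        PySem.Dict.empty
    let columns := PySem.List.sorted by_column.keys (fun c => c)
    -- for i, col in enumerate(columns): result.extend([(col, y) for y in sorted(ys, reverse=(i%2==1))])
    (PySem.List.enumerate columns).foldl
      (fun res ic =>
        res ++ (PySem.List.sorted (by_column.getD ic.2 []) (fun y => y)
                  (PySem.Int.mod ic.1 2 == 1)).map (fun y => (ic.2, y))) []

-- ===== PORT B =====
-- loop body of B: state is (result, rev, run, prev_x)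
def bStep (st : List (Int × Int) × Bool × List (Int × Int) × Option Int) (p : Int × Int) :
    List (Int × Int) × Bool × List (Int × Int) × Option Int :=
  if st.2.2.1 ≠ [] ∧ st.2.2.2 ≠ some p.1 then
    (st.1 ++ (if st.2.1 then st.2.2.1.reverse else st.2.2.1), !st.2.1, [p], some p.1)
  else
    (st.1, st.2.1, st.2.2.1 ++ [p], some p.1)

def optimize_coords_alt (coords : List (Int × Int)) : List (Int × Int) :=
  -- sorted(coords, key=p[1]) then stable sorted(·, key=p[0])  (Source B's two stable passes)
  let s := PySem.List.sorted (PySem.List.sorted coords (fun p => p.2)) (fun p => p.1)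
  let st := s.foldl bStep (([] : List (Int × Int)), false, ([] : List (Int × Int)), (none : Option Int))
  st.1 ++ (if st.2.1 then st.2.2.1.reverse else st.2.2.1)

-- ===== PRECONDITION & SPEC =====
def Spec_optimize_coords (coords : List (Int × Int)) (out : List (Int × Int)) : Prop := out = optimize_coords_alt coords
instance (coords : List (Int × Int)) (out : List (Int × Int)) : Decidable (Spec_optimize_coords coords out) := by unfold Spec_optimize_coords; infer_instance

-- ===== CLAIM (what is proved, stated in full; the proofs are below) =====
def Claim_equal_optimize_coords : Prop := ∀ (coords : List (Int × Int)), Dom_optimize_coords coords → Spec_optimize_coords coords (optimize_coords coords)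

-- ===== LEMMAS AND PROOFS =====

-- the ys of column c, in input order
def pvYs (coords : List (Int × Int)) (c : Int) : List Int :=
  (coords.filter (fun p => p.1 == c)).map (fun p => p.2)

-- the distinct columns, ascending
def pvCols (coords : List (Int × Int)) : List Int :=
  PySem.List.sorted (PySem.Set.ofList (coords.map (fun p => p.1))) (fun c => c)

-- the common normal form of both programs
def pvSnake (coords : List (Int × Int)) : Bool → List Int → List (Int × Int)
  | _, [] => []
  | rev, c :: cs =>
      (PySem.List.sorted (pvYs coords c) (fun y => y) rev).map (fun y => (c, y))
        ++ pvSnake coords (!rev) cs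

def pvFinish (st : List (Int × Int) × Bool × List (Int × Int) × Option Int) : List (Int × Int) :=
  st.1 ++ (if st.2.1 then st.2.2.1.reverse else st.2.2.1)

theorem pv_insertBy_nil {α : Type} (b : α → α → Bool) (x : α) :
    PySem.List.insertBy b x [] = [x] := rfl

theorem pv_insertBy_cons {α : Type} (b : α → α → Bool) (x y : α) (ys : List α) :
    PySem.List.insertBy b x (y :: ys) =
      if b x y then x :: y :: ys else y :: PySem.List.insertBy b x ys := rfl

theorem pv_insertBy_eq_cons {α : Type} (b : α → α → Bool) (x : α) (l : List α)
    (h : ∀ z ∈ l, b x z = true) : PySem.List.insertBy b x l = x :: l := by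
  cases l with
  | nil => rfl
  | cons y ys => rw [pv_insertBy_cons, if_pos (h y (by simp))]

theorem pv_filter_insertBy {α κ : Type} [LinearOrder κ] (key : α → κ) (p : α → Bool) (x : α)
    (l : List α) (hl : l.Pairwise (fun a b => key a ≤ key b)) :
    (PySem.List.insertBy (fun a b => decide (key a < key b)) x l).filter p =
      if p x then PySem.List.insertBy (fun a b => decide (key a < key b)) x (l.filter p)
      else l.filter p := by
  induction l with
  | nil => by_cases hp : p x <;> simp [hp, pv_insertBy_nil, List.filter]
  | cons y ys ih =>
    rw [List.pairwise_cons] at hl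
    obtain ⟨hy, hys⟩ := hl
    rw [pv_insertBy_cons]
    by_cases hxy : key x < key y
    · rw [if_pos (by simpa using hxy)]
      by_cases hp : p x
      · rw [if_pos hp, List.filter_cons_of_pos hp,
          pv_insertBy_eq_cons _ _ _ (by
            intro z hz
            rw [List.mem_filter] at hz
            rcases List.mem_cons.mp hz.1 with h | h
            · subst h; simpa using hxy
            · simpa using lt_of_lt_of_le hxy (hy z h))]
      · rw [if_neg hp, List.filter_cons_of_neg hp]
    · rw [if_neg (by simpa using hxy)]
      by_cases hq : p y
      · rw [List.filter_cons_of_pos hq, List.filter_cons_of_pos hq, ih hys]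
        by_cases hp : p x
        · rw [if_pos hp, if_pos hp, pv_insertBy_cons, if_neg (by simpa using hxy)]
        · rw [if_neg hp, if_neg hp]
      · rw [List.filter_cons_of_neg hq, List.filter_cons_of_neg hq, ih hys]

theorem pv_sorted_append_singleton {α κ : Type} [LinearOrder κ] (key : α → κ) (xs : List α) (x : α) :
    PySem.List.sorted (xs ++ [x]) key =
      PySem.List.insertBy (fun a b => decide (key a < key b)) x (PySem.List.sorted xs key) := by
  simp [PySem.List.sorted, List.foldl_append]

theorem pv_filter_sorted {α κ : Type} [LinearOrder κ] (key : α → κ) (p : α → Bool) (xs : List α) :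
    (PySem.List.sorted xs key).filter p = PySem.List.sorted (xs.filter p) key := by
  induction xs using List.reverseRecOn with
  | nil => rfl
  | append_singleton xs x ih =>
    rw [pv_sorted_append_singleton, pv_filter_insertBy key p x _ (PySem.List.sorted_pairwise xs key),
      List.filter_append]
    by_cases hp : p x
    · rw [if_pos hp]
      simp only [List.filter_cons_of_pos hp, List.filter_nil]
      rw [pv_sorted_append_singleton, ih]
    · rw [if_neg hp]
      simp only [List.filter_cons_of_neg hp, List.filter_nil, List.append_nil]
      rw [ih]

theorem pv_map_insertBy {α β κ : Type} [LinearOrder κ] (f : α → β) (key : β → κ) (x : α) (l : List α) :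
    (PySem.List.insertBy (fun a b => decide (key (f a) < key (f b))) x l).map f =
      PySem.List.insertBy (fun a b => decide (key a < key b)) (f x) (l.map f) := by
  induction l with
  | nil => rfl
  | cons y ys ih =>
    rw [pv_insertBy_cons, List.map_cons, pv_insertBy_cons]
    by_cases h : key (f x) < key (f y)
    · rw [if_pos (by simpa using h), if_pos (by simpa using h)]; rfl
    · rw [if_neg (by simpa using h), if_neg (by simpa using h), List.map_cons, ih]

theorem pv_map_sorted {α β κ : Type} [LinearOrder κ] (f : α → β) (key : β → κ) (xs : List α) :
    (PySem.List.sorted xs (fun a => key (f a))).map f = PySem.List.sorted (xs.map f) key := by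
  induction xs using List.reverseRecOn with
  | nil => rfl
  | append_singleton xs x ih =>
    rw [pv_sorted_append_singleton, pv_map_insertBy, ih, List.map_append, List.map_cons,
      List.map_nil, pv_sorted_append_singleton]

theorem pv_sorted_rev_eq_reverse (ys : List Int) :
    PySem.List.sorted ys (fun y => y) true = (PySem.List.sorted ys (fun y => y)).reverse := by
  apply PySem.List.eq_of_perm_of_pairwise_le_of_injective (key := fun y : Int => -y)
    (fun a b h => by simpa using h)
  · exact (PySem.List.sorted_perm ys _ true).trans
      ((PySem.List.sorted_perm ys _ false).symm.trans (List.reverse_perm _).symm)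
  · exact (PySem.List.sorted_pairwise_rev ys _).imp (by intro a b h; simpa using h)
  · rw [List.pairwise_reverse]
    exact (PySem.List.sorted_pairwise ys _).imp (by intro a b h; simpa using h)

theorem pv_buildA_eq (coords : List (Int × Int)) :
    coords.foldl (fun d p =>
        (if d.contains p.1 then d else d.insert p.1 []).modify p.1 [] (fun l => l ++ [p.2]))
        PySem.Dict.empty
      = coords.foldl (fun d p => d.modify p.1 [] (fun l => l ++ [p.2])) PySem.Dict.empty := by
  have hstep : ∀ (d : PySem.Dict Int (List Int)) (p : Int × Int),
      (if d.contains p.1 then d else d.insert p.1 []).modify p.1 [] (fun l => l ++ [p.2])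
        = d.modify p.1 [] (fun l => l ++ [p.2]) := by
    intro d p
    by_cases h : d.contains p.1
    · rw [if_pos h]
    · rw [if_neg h, PySem.Dict.modify, PySem.Dict.modify,
        PySem.Dict.getD_insert_self, PySem.Dict.insert_insert_self,
        PySem.Dict.getD_of_not_contains (h := by simpa using h)]
  have : (fun (d : PySem.Dict Int (List Int)) (p : Int × Int) =>
      (if d.contains p.1 then d else d.insert p.1 []).modify p.1 [] (fun l => l ++ [p.2]))
      = fun d p => d.modify p.1 [] (fun l => l ++ [p.2]) := funext fun d => funext fun p => hstep d p
  rw [this]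

theorem pv_byColumn_getD (coords : List (Int × Int)) (c : Int) :
    (coords.foldl (fun d p =>
        (if d.contains p.1 then d else d.insert p.1 []).modify p.1 [] (fun l => l ++ [p.2]))
        PySem.Dict.empty).getD c [] = pvYs coords c := by
  rw [pv_buildA_eq, PySem.Dict.getD_foldl_modify_append, PySem.Dict.getD_empty]
  rfl

theorem pv_byColumn_keys (coords : List (Int × Int)) :
    (coords.foldl (fun d p =>
        (if d.contains p.1 then d else d.insert p.1 []).modify p.1 [] (fun l => l ++ [p.2]))
        PySem.Dict.empty).keys = PySem.Set.ofList (coords.map (fun p => p.1)) := by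
  rw [pv_buildA_eq]
  rw [PySem.Dict.keys_foldl_modify_key coords (fun p => p.1) [] (fun _ p l => l ++ [p.2])]
  rw [PySem.Dict.keys_empty]
  rfl

theorem pv_enumerate_cons {α : Type} (x : α) (t : List α) (i : Int) :
    PySem.List.enumerate (x :: t) i = (i, x) :: PySem.List.enumerate t (i + 1) := rfl

theorem pv_parity_succ (i : Int) :
    (PySem.Int.mod (i + 1) 2 == 1) = !(PySem.Int.mod i 2 == 1) := by
  rw [PySem.Int.mod_eq_emod_of_pos (by norm_num), PySem.Int.mod_eq_emod_of_pos (by norm_num)]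
  by_cases h : i % 2 = 1
  · have : (i + 1) % 2 = 0 := by omega
    simp [h, this]
  · have h0 : i % 2 = 0 := by omega
    have : (i + 1) % 2 = 1 := by omega
    simp [h0, this]

theorem pv_enum_snake (coords : List (Int × Int)) (cs : List Int) : ∀ i : Int,
    (PySem.List.enumerate cs i).flatMap
        (fun ic => (PySem.List.sorted (pvYs coords ic.2) (fun y => y)
            (PySem.Int.mod ic.1 2 == 1)).map (fun y => (ic.2, y)))
      = pvSnake coords (PySem.Int.mod i 2 == 1) cs := by
  induction cs with
  | nil => intro i; rfl
  | cons c t ih =>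
    intro i
    rw [pv_enumerate_cons, List.flatMap_cons, ih (i + 1), pv_parity_succ, pvSnake]

theorem pv_A_eq_snake (coords : List (Int × Int)) :
    optimize_coords coords = pvSnake coords false (pvCols coords) := by
  by_cases h : coords = []
  · subst h; rfl
  · simp only [optimize_coords, if_neg h]
    rw [PySem.List.foldl_append_eq_flatMap]
    simp only [pv_byColumn_getD, pv_byColumn_keys, List.nil_append]
    have := pv_enum_snake coords (pvCols coords) 0
    simpa [pvCols] using this

theorem pv_filter_split_min (c : Int) (l : List (Int × Int))
    (hl : l.Pairwise (fun a b => a.1 ≤ b.1)) (hmin : ∀ p ∈ l, c ≤ p.1) :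
    l = l.filter (fun q => q.1 == c) ++ l.filter (fun q => !(q.1 == c)) := by
  induction l with
  | nil => rfl
  | cons p t ih =>
    rw [List.pairwise_cons] at hl
    obtain ⟨hp, ht⟩ := hl
    by_cases hc : p.1 = c
    · rw [List.filter_cons_of_pos (by simpa using hc),
        List.filter_cons_of_neg (by simpa using hc), List.cons_append]
      exact congrArg (p :: ·) (ih ht (fun q hq => hmin q (List.mem_cons_of_mem p hq)))
    · have hlt : c < p.1 := lt_of_le_of_ne (hmin p (by simp)) (Ne.symm hc)
      have hnone : ∀ q ∈ p :: t, ¬ (q.1 == c) = true := by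
        intro q hq
        rcases List.mem_cons.mp hq with h | h
        · subst h; simpa using hc
        · have := hp q h
          simp only [beq_iff_eq]
          omega
      rw [List.filter_eq_nil_iff.mpr hnone, List.nil_append,
        List.filter_eq_self.mpr (fun q hq => by simpa using hnone q hq)]

theorem pv_flatMap_filter (cs : List Int) : ∀ (l : List (Int × Int)),
    l.Pairwise (fun a b => a.1 ≤ b.1) → cs.Pairwise (· < ·) →
    (∀ p ∈ l, p.1 ∈ cs) →
    l = cs.flatMap (fun c => l.filter (fun q => q.1 == c)) := by
  induction cs with
  | nil =>
    intro l _ _ hmem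
    cases l with
    | nil => rfl
    | cons p t => exact absurd (hmem p (by simp)) (by simp)
  | cons c cs ih =>
    intro l hl hcs hmem
    rw [List.pairwise_cons] at hcs
    obtain ⟨hc, hcs'⟩ := hcs
    have hmin : ∀ p ∈ l, c ≤ p.1 := by
      intro p hp
      rcases List.mem_cons.mp (hmem p hp) with h | h
      · omega
      · exact le_of_lt (hc _ h)
    rw [List.flatMap_cons]
    set l' := l.filter (fun q => !(q.1 == c)) with hl'
    have hsplit := pv_filter_split_min c l hl hmin
    have htail : l' = cs.flatMap (fun c' => l'.filter (fun q => q.1 == c')) := by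
      apply ih l' (hl.filter _) hcs'
      intro p hp
      rw [hl', List.mem_filter] at hp
      rcases List.mem_cons.mp (hmem p hp.1) with h | h
      · exact absurd (by simpa using h) (by simpa using hp.2)
      · exact h
    have hfilters : ∀ c' ∈ cs, l'.filter (fun q => q.1 == c') = l.filter (fun q => q.1 == c') := by
      intro c' hc'
      have hne : c' ≠ c := by have := hc c' hc'; omega
      rw [hl', List.filter_filter]
      apply List.filter_congr
      intro q _
      by_cases h : q.1 = c'
      · simp [h, hne]
      · simp [h]
    calc l = l.filter (fun q => q.1 == c) ++ l' := hsplit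
    _ = l.filter (fun q => q.1 == c) ++ cs.flatMap (fun c' => l.filter (fun q => q.1 == c')) := by
        rw [htail]
        congr 1
        simp only [List.flatMap_def]
        exact congrArg List.flatten (List.map_congr_left hfilters)

theorem pv_const_fst_reconstruct (c : Int) (l : List (Int × Int)) (h : ∀ p ∈ l, p.1 = c) :
    l = (l.map (fun p => p.2)).map (fun y => (c, y)) := by
  induction l with
  | nil => rfl
  | cons p t ih =>
    simp only [List.map_cons]
    have hp := h p (by simp)
    rw [← ih (fun q hq => h q (List.mem_cons_of_mem p hq))]
    congr 1
    exact Prod.ext (by simp [hp]) rfl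

theorem pv_block_char (coords : List (Int × Int)) (c : Int) :
    (PySem.List.sorted (PySem.List.sorted coords (fun p => p.2)) (fun p => p.1)).filter
        (fun q => q.1 == c)
      = (PySem.List.sorted (pvYs coords c) (fun y => y)).map (fun y => (c, y)) := by
  rw [pv_filter_sorted, pv_filter_sorted]
  set L := PySem.List.sorted (coords.filter (fun q => q.1 == c)) (fun p => p.2) with hL
  have hfst : ∀ p ∈ L, p.1 = c := by
    intro p hp
    rw [hL, PySem.List.mem_sorted] at hp
    exact by simpa using (List.mem_filter.mp hp).2
  have h1 : PySem.List.sorted L (fun p => p.1) = L := by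
    apply PySem.List.sorted_eq_self_of_pairwise
    apply List.pairwise_of_forall_mem_list
    intro a ha b hb
    rw [hfst a ha, hfst b hb]
  rw [h1]
  have h2 : L.map (fun p => p.2) = PySem.List.sorted (pvYs coords c) (fun y => y) := by
    rw [hL, pvYs]
    exact pv_map_sorted (f := fun p : Int × Int => p.2) (key := fun y : Int => y) (xs := coords.filter (fun p => p.1 == c))
  rw [← h2]
  exact pv_const_fst_reconstruct c L hfst

theorem pv_foldB_run (l : List (Int × Int)) (c : Int) (h : ∀ p ∈ l, p.1 = c) :
    ∀ res rev run, l.foldl bStep (res, rev, run, some c) = (res, rev, run ++ l, some c) := by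
  induction l with
  | nil => intro res rev run; simp
  | cons p t ih =>
    intro res rev run
    have hp : p.1 = c := h p (by simp)
    rw [List.foldl_cons]
    have hstep : bStep (res, rev, run, some c) p = (res, rev, run ++ [p], some c) := by
      simp [bStep, hp]
    rw [hstep, ih (fun q hq => h q (List.mem_cons_of_mem p hq)), List.append_assoc]
    rfl

theorem pv_flush_block (coords : List (Int × Int)) (c : Int) (b : Bool) :
    (if b then ((PySem.List.sorted (pvYs coords c) (fun y => y)).map (fun y => (c, y))).reverse
     else (PySem.List.sorted (pvYs coords c) (fun y => y)).map (fun y => (c, y)))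
      = (PySem.List.sorted (pvYs coords c) (fun y => y) b).map (fun y => (c, y)) := by
  cases b
  · rfl
  · rw [if_pos rfl, pv_sorted_rev_eq_reverse, List.map_reverse]

theorem pv_foldB_blocks (coords : List (Int × Int)) (cs : List Int) :
    ∀ res rev run c, run ≠ [] → c ∉ cs → cs.Nodup →
      (∀ c' ∈ cs, pvYs coords c' ≠ []) →
      pvFinish ((cs.flatMap
          (fun c' => (PySem.List.sorted (pvYs coords c') (fun y => y)).map (fun y => (c', y)))).foldl
            bStep (res, rev, run, some c))
        = res ++ (if rev then run.reverse else run) ++ pvSnake coords (!rev) cs := by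
  induction cs with
  | nil =>
    intro res rev run c _ _ _ _
    simp [pvFinish, pvSnake]
  | cons c' cs ih =>
    intro res rev run c hrun hc hnd hys
    have hc' : c ≠ c' := fun h => hc (h ▸ List.mem_cons_self ..)
    obtain ⟨q, qs, hblk⟩ : ∃ q qs,
        (PySem.List.sorted (pvYs coords c') (fun y => y)).map (fun y => (c', y)) = q :: qs := by
      have hne : (PySem.List.sorted (pvYs coords c') (fun y => y)) ≠ [] := by
        rw [ne_eq, PySem.List.sorted_eq_nil_iff]
        exact hys c' (by simp)
      cases hsl : PySem.List.sorted (pvYs coords c') (fun y => y) with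
      | nil => exact absurd hsl hne
      | cons a as => exact ⟨(c', a), as.map (fun y => (c', y)), by simp⟩
    have hqfst : ∀ p ∈ q :: qs, p.1 = c' := by
      intro p hp
      rw [← hblk] at hp
      obtain ⟨y, _, hy⟩ := List.mem_map.mp hp
      rw [← hy]
    rw [List.flatMap_cons, hblk, List.foldl_append, List.foldl_cons]
    have hstep : bStep (res, rev, run, some c) q =
        (res ++ (if rev then run.reverse else run), !rev, [q], some c') := by
      rw [bStep, if_pos ⟨hrun, by simp [hqfst q (by simp), hc']⟩, hqfst q (by simp)]
    rw [hstep, pv_foldB_run qs c' (fun p hp => hqfst p (List.mem_cons_of_mem q hp)),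
      ih _ _ _ c' (by simp)
      (List.nodup_cons.mp hnd).1 (List.nodup_cons.mp hnd).2
      (fun c'' hc'' => hys c'' (List.mem_cons_of_mem c' hc''))]
    rw [List.singleton_append, ← hblk, pv_flush_block]
    show _ = res ++ (if rev then run.reverse else run) ++ pvSnake coords (!rev) (c' :: cs)
    rw [pvSnake]
    simp [List.append_assoc]

theorem pv_B_eq_snake (coords : List (Int × Int)) :
    optimize_coords_alt coords = pvSnake coords false (pvCols coords) := by
  by_cases h0 : coords = []
  · subst h0; rfl
  · have hs : PySem.List.sorted (PySem.List.sorted coords (fun p => p.2)) (fun p => p.1)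
        = (pvCols coords).flatMap
            (fun c => (PySem.List.sorted (pvYs coords c) (fun y => y)).map (fun y => (c, y))) := by
      have hdec := pv_flatMap_filter (pvCols coords)
        (PySem.List.sorted (PySem.List.sorted coords (fun p => p.2)) (fun p => p.1))
        (PySem.List.sorted_pairwise (PySem.List.sorted coords (fun p : Int × Int => p.2)) (fun p : Int × Int => p.1))
        (PySem.List.sorted_ofList_pairwise_lt (coords.map (fun p => p.1)))
        (by
          intro p hp
          rw [PySem.List.mem_sorted, PySem.List.mem_sorted] at hp
          rw [pvCols, PySem.List.mem_sorted, PySem.Set.mem_ofList]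
          exact List.mem_map_of_mem hp)
      rw [hdec]
      exact List.flatMap_congr (fun c _ => pv_block_char coords c)
    have hys : ∀ c ∈ pvCols coords, pvYs coords c ≠ [] := by
      intro c hc
      rw [pvCols, PySem.List.mem_sorted, PySem.Set.mem_ofList] at hc
      obtain ⟨p, hp, hpc⟩ := List.mem_map.mp hc
      rw [pvYs, ne_eq, List.map_eq_nil_iff, List.filter_eq_nil_iff]
      intro hall
      exact hall p hp (by simpa using hpc)
    cases hcols : pvCols coords with
    | nil =>
      exfalso
      obtain ⟨p, hp⟩ := List.exists_mem_of_ne_nil coords h0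
      have : p.1 ∈ pvCols coords := by
        rw [pvCols, PySem.List.mem_sorted, PySem.Set.mem_ofList]
        exact List.mem_map_of_mem hp
      rw [hcols] at this
      exact absurd this (by simp)
    | cons c0 cs =>
      have hnd : (c0 :: cs).Nodup := by
        rw [← hcols, pvCols]
        exact ((PySem.List.sorted_ofList_pairwise_lt (coords.map (fun p => p.1))).imp
          (fun h => ne_of_lt h))
      obtain ⟨q, qs, hblk⟩ : ∃ q qs,
          (PySem.List.sorted (pvYs coords c0) (fun y => y)).map (fun y => (c0, y)) = q :: qs := by
        have hne : (PySem.List.sorted (pvYs coords c0) (fun y => y)) ≠ [] := by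
          rw [ne_eq, PySem.List.sorted_eq_nil_iff]
          exact hys c0 (by rw [hcols]; simp)
        cases hsl : PySem.List.sorted (pvYs coords c0) (fun y => y) with
        | nil => exact absurd hsl hne
        | cons a as => exact ⟨(c0, a), as.map (fun y => (c0, y)), by simp⟩
      have hqfst : ∀ p ∈ q :: qs, p.1 = c0 := by
        intro p hp
        rw [← hblk] at hp
        obtain ⟨y, _, hy⟩ := List.mem_map.mp hp
        rw [← hy]
      show pvFinish _ = _
      rw [hs, hcols, List.flatMap_cons, hblk, List.foldl_append, List.foldl_cons]
      have hstep : bStep ([], false, [], none) q = ([], false, [q], some c0) := by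
        simp [bStep, hqfst q (by simp)]
      rw [hstep, pv_foldB_run qs c0 (fun p hp => hqfst p (List.mem_cons_of_mem q hp)),
        pv_foldB_blocks coords cs [] false ([q] ++ qs) c0 (by simp)
          (List.nodup_cons.mp hnd).1 (List.nodup_cons.mp hnd).2
          (fun c' hc' => hys c' (by rw [hcols]; exact List.mem_cons_of_mem c0 hc'))]
      rw [List.singleton_append, ← hblk]
      show (PySem.List.sorted (pvYs coords c0) (fun y => y)).map (fun y => (c0, y))
          ++ pvSnake coords true cs = pvSnake coords false (c0 :: cs)
      rw [pvSnake]
      norm_num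

-- ===== VERDICT (by name: the statement is the Claim_ definition above) =====
theorem optimize_coords_spec : Claim_equal_optimize_coords := by
  intro coords _
  unfold Spec_optimize_coords
  rw [pv_A_eq_snake, pv_B_eq_snake]
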